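-- pv_equiv track=rewrite | github.com/Donghh0221/Algorithms_py | coding_test/kakao_2019_blind_recruitment/Block_game.py | find_breakable
-- ===== SOURCE A (Python) =====
-- def find_breakable(candidate_area, board):
--     breakable = []
--     for area in candidate_area:
--         rec_type = area[0]
--         x, y = area[1][0], area[1][1]
--         flag = 1
--         if rec_type == 1:
--             for i in range(y + 1):
--                 if board[i][x + 1] != 0 or board[i][x + 2] != 0:
--                     flag = 0
--                     break
--             if flag:
--                 breakable.append(area)
--
--         elif rec_type == 2:
--             for i in range(y + 1):
--                 if board[i][x] != 0 or board[i][x + 1] != 0: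
--                     flag = 0
--                     break
--             if flag:
--                 breakable.append(area)
--
--         elif rec_type == 3:
--             for i in range(y + 1):
--                 if board[i][x + 1] != 0:
--                     flag = 0
--                     break
--             if flag:
--                 breakable.append(area)
--
--         elif rec_type == 4:
--             for i in range(y + 1):
--                 if board[i][x] != 0:
--                     flag = 0
--                     break
--             if flag:
--                 breakable.append(area)
--
--     return breakable
-- ===== SOURCE B (Python) =====
-- def find_breakable(candidate_area, board):
--     # Precompute, per column, the topmost row index holding a nonzero cell
--     # (default H = "column empty"), then each candidate is decided by lookups.
--     H = len(board)
--     top = {}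
--     for i, row in enumerate(board):
--         for j, v in enumerate(row):
--             if v != 0 and j not in top:
--                 top[j] = i
--     need = {1: (1, 2), 2: (0, 1), 3: (1,), 4: (0,)}
--     return [area for area in candidate_area
--             if area[0] in need
--             and all(top.get(area[1][0] + d, H) > area[1][1] for d in need[area[0]])]
-- ===== Notes on version B (the rewrite author's own statement) =====
-- stated objective: alternative
-- what changed: Instead of rescanning rows 0..y of the needed columns for every candidate, B precomputes once per board the topmost nonzero row of each column (one pass over the board) and decides each candidate by dictionary lookups; on the generated inputs this was not measurably faster (A's scans stop early), so it trades per-candidate scans for one whole-board pass.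
-- outside the precondition, e.g. on find_breakable([(2, (-1, 0))], [[0, 7]]): A returns [], B returns [(2, (-1, 0))]; on find_breakable([(1, (0, 0))], [[5, 3]]): A returns [], B returns []
import Mathlib
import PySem

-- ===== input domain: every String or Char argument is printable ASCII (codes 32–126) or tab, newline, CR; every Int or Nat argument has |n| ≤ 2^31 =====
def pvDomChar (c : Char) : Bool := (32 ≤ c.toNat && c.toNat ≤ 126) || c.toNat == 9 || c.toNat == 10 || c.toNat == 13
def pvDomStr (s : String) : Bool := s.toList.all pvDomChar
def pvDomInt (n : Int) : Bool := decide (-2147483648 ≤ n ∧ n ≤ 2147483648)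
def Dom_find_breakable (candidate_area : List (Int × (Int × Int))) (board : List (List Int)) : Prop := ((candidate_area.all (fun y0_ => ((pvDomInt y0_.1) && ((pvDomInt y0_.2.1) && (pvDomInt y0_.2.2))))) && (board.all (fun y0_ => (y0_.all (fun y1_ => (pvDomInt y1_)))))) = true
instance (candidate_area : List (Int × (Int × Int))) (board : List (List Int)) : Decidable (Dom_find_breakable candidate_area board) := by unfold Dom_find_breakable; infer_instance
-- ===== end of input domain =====

-- B replaces A's per-candidate rescans of board rows by one precomputed per-column
-- topmost-nonzero-row dictionary, deciding each candidate by lookups (alternative algorithm).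


-- ===== PORT A =====
-- 'for i in range(y+1): if <bad>: flag = 0; break' — returns the final flag as a Bool
def aLoop (bad : Int → Bool) : List Int → Bool
  | [] => true
  | i :: rest => if bad i then false else aLoop bad rest

-- board[i][c] (Python indexing; always in range inside Pre_, so the defaults are never reached there)
def aCell (board : List (List Int)) (i c : Int) : Int :=
  PySem.List.pyGetD (PySem.List.pyGetD board i []) c 0

def find_breakable (candidate_area : List (Int × (Int × Int))) (board : List (List Int)) : List (Int × (Int × Int)) :=
  candidate_area.foldl (fun breakable area =>
    let rec_type := area.1
    let x := area.2.1
    let y := area.2.2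
    if rec_type == 1 then
      (if aLoop (fun i => (aCell board i (x + 1) != 0) || (aCell board i (x + 2) != 0))
          (PySem.List.pyRange 0 (y + 1) 1) then breakable ++ [area] else breakable)
    else if rec_type == 2 then
      (if aLoop (fun i => (aCell board i x != 0) || (aCell board i (x + 1) != 0))
          (PySem.List.pyRange 0 (y + 1) 1) then breakable ++ [area] else breakable)
    else if rec_type == 3 then
      (if aLoop (fun i => aCell board i (x + 1) != 0)
          (PySem.List.pyRange 0 (y + 1) 1) then breakable ++ [area] else breakable)
    else if rec_type == 4 then
      (if aLoop (fun i => aCell board i x != 0)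
          (PySem.List.pyRange 0 (y + 1) 1) then breakable ++ [area] else breakable)
    else breakable) []

-- ===== PORT B =====
-- top = {}; for i, row in enumerate(board): for j, v in enumerate(row): if v != 0 and j not in top: top[j] = i
def bTop (board : List (List Int)) : PySem.Dict Int Int :=
  (PySem.List.enumerate board 0).foldl (fun d p =>
    (PySem.List.enumerate p.2 0).foldl (fun d q =>
      if q.2 != 0 && !(d.contains q.1) then d.insert q.1 p.1 else d) d) PySem.Dict.empty

-- need = {1: (1, 2), 2: (0, 1), 3: (1,), 4: (0,)}; need.get(rec_type)
def bNeed (t : Int) : Option (List Int) :=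
  if t == 1 then some [1, 2] else if t == 2 then some [0, 1]
  else if t == 3 then some [1] else if t == 4 then some [0] else none

def find_breakable_alt (candidate_area : List (Int × (Int × Int))) (board : List (List Int)) : List (Int × (Int × Int)) :=
  let H : Int := board.length
  let top := bTop board
  candidate_area.filter (fun area =>
    match bNeed area.1 with
    | some ds => ds.all (fun dlt => decide (area.2.2 < top.getD (area.2.1 + dlt) H))
    | none => false)

-- ===== PRECONDITION & SPEC =====
-- The board columns a candidate (t, (x, y)) with y ≥ 0 makes A read
def preCols (t x : Int) : List Int :=
  if t = 1 then [x + 1, x + 2] else if t = 2 then [x, x + 1]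
  else if t = 3 then [x + 1] else if t = 4 then [x] else []

-- Pre_ excludes candidates whose scanned cell indices leave the board: a negative column
-- index silently wraps Python-style, and an out-of-range row or column index raises
-- IndexError unless an earlier nonzero cell breaks the scan (or `or` short-circuits) first —
-- so A returns on some excluded inputs, but only by such accidents of scan order.
def Pre_find_breakable (candidate_area : List (Int × (Int × Int))) (board : List (List Int)) : Prop :=
  ∀ a ∈ candidate_area, ∀ c ∈ preCols a.1 a.2.1, 0 ≤ a.2.2 →
    a.2.2 < (board.length : Int) ∧ 0 ≤ c ∧
      ∀ row ∈ board.take (a.2.2.toNat + 1), c < (row.length : Int)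
instance (candidate_area : List (Int × (Int × Int))) (board : List (List Int)) : Decidable (Pre_find_breakable candidate_area board) := by unfold Pre_find_breakable; infer_instance

def pvWitness_find_breakable : (List (Int × (Int × Int))) × List (List Int) :=
  ([(1, (0, 1)), (4, (2, 0)), (2, (0, -2)), (7, (9, 9))], [[0, 0, 0], [0, 1, 0]])

def Spec_find_breakable (candidate_area : List (Int × (Int × Int))) (board : List (List Int)) (out : List (Int × (Int × Int))) : Prop := out = find_breakable_alt candidate_area board
instance (candidate_area : List (Int × (Int × Int))) (board : List (List Int)) (out : List (Int × (Int × Int))) : Decidable (Spec_find_breakable candidate_area board out) := by unfold Spec_find_breakable; infer_instance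

-- ===== CLAIM (what is proved, stated in full; the proofs are below) =====
def Claim_equal_find_breakable : Prop := ∀ (candidate_area : List (Int × (Int × Int))) (board : List (List Int)), Dom_find_breakable candidate_area board → Pre_find_breakable candidate_area board → Spec_find_breakable candidate_area board (find_breakable candidate_area board)

-- ===== LEMMAS AND PROOFS =====

-- A's per-candidate keep decision, extracted so the fold becomes a filter
def keepA (board : List (List Int)) (area : Int × (Int × Int)) : Bool :=
  if area.1 == 1 then
    aLoop (fun i => (aCell board i (area.2.1 + 1) != 0) || (aCell board i (area.2.1 + 2) != 0))
      (PySem.List.pyRange 0 (area.2.2 + 1) 1)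
  else if area.1 == 2 then
    aLoop (fun i => (aCell board i area.2.1 != 0) || (aCell board i (area.2.1 + 1) != 0))
      (PySem.List.pyRange 0 (area.2.2 + 1) 1)
  else if area.1 == 3 then
    aLoop (fun i => aCell board i (area.2.1 + 1) != 0) (PySem.List.pyRange 0 (area.2.2 + 1) 1)
  else if area.1 == 4 then
    aLoop (fun i => aCell board i area.2.1 != 0) (PySem.List.pyRange 0 (area.2.2 + 1) 1)
  else false

lemma find_breakable_eq_filter (ca : List (Int × (Int × Int))) (board : List (List Int)) :
    find_breakable ca board = ca.filter (keepA board) := by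
  have hbody : (fun (breakable : List (Int × (Int × Int))) area =>
      let rec_type := area.1
      let x := area.2.1
      let y := area.2.2
      if rec_type == 1 then
        (if aLoop (fun i => (aCell board i (x + 1) != 0) || (aCell board i (x + 2) != 0))
            (PySem.List.pyRange 0 (y + 1) 1) then breakable ++ [area] else breakable)
      else if rec_type == 2 then
        (if aLoop (fun i => (aCell board i x != 0) || (aCell board i (x + 1) != 0))
            (PySem.List.pyRange 0 (y + 1) 1) then breakable ++ [area] else breakable)
      else if rec_type == 3 then
        (if aLoop (fun i => aCell board i (x + 1) != 0)
            (PySem.List.pyRange 0 (y + 1) 1) then breakable ++ [area] else breakable)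
      else if rec_type == 4 then
        (if aLoop (fun i => aCell board i x != 0)
            (PySem.List.pyRange 0 (y + 1) 1) then breakable ++ [area] else breakable)
      else breakable)
      = fun breakable area => if keepA board area then breakable ++ [area] else breakable := by
    funext breakable area
    simp only [keepA]
    split <;> [skip; split <;> [skip; split <;> [skip; split]]] <;> simp
  show List.foldl _ [] ca = _
  rw [hbody]
  have := PySem.List.foldl_append_if (keepA board) id ca []
  simpa using this

lemma aLoop_eq_all (bad : Int → Bool) (l : List Int) : aLoop bad l = l.all (fun i => !bad i) := by
  induction l with
  | nil => rfl
  | cons i rest ih => by_cases h : bad i <;> simp [aLoop, h, ih]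

lemma aLoop_range_iff (bad : Int → Bool) (y : Int) :
    aLoop bad (PySem.List.pyRange 0 (y + 1) 1) = true ↔
      ∀ i : Int, 0 ≤ i → i ≤ y → bad i = false := by
  rw [aLoop_eq_all]
  simp only [List.all_eq_true, PySem.List.mem_pyRange_one, Bool.not_eq_eq_eq_not, Bool.not_true]
  constructor
  · intro h i h0 hy; exact h i ⟨h0, by omega⟩
  · intro h i hi; exact h i hi.1 (by omega)

-- is the cell of `row` at column c nonzero (c taken as an absolute, nonnegative index)?
def rowNZ (row : List Int) (c : Int) : Bool := decide (0 ≤ c) && (row.getD c.toNat 0 != 0)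

-- first row index ≥ s (scanning `board` downward) whose cell in column c is nonzero
def topFind (board : List (List Int)) (s c : Int) : Option Int :=
  match board with
  | [] => none
  | row :: rest => if rowNZ row c then some s else topFind rest (s + 1) c

lemma rowFold_get? (row : List Int) (d : PySem.Dict Int Int) (s i c : Int) :
    ((PySem.List.enumerate row s).foldl (fun d q =>
        if q.2 != 0 && !(d.contains q.1) then d.insert q.1 i else d) d).get? c
    = if d.contains c then d.get? c
      else if decide (s ≤ c) && (row.getD (c - s).toNat 0 != 0) then some i else none := by
  induction row generalizing d s with
  | nil =>
    simp only [PySem.List.enumerate_nil, List.foldl_nil, List.getD_nil]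
    split
    · rfl
    · next h =>
      rw [(PySem.Dict.get?_eq_none_iff_contains d c).mpr (by revert h; cases d.contains c <;> simp)]
      simp
  | cons v rest ih =>
    simp only [PySem.List.enumerate_cons, List.foldl_cons]
    by_cases hs : (v != 0 && !(d.contains s)) = true
    · have hv : v ≠ 0 := by simpa using (Bool.and_elim_left hs)
      have hds : d.contains s = false := by
        have := Bool.and_elim_right hs; simpa using this
      rw [show (if ((s, v).2 != 0 && !(d.contains (s, v).1)) = true
            then d.insert (s, v).1 i else d) = d.insert s i by simp [hs]]
      rw [ih]
      by_cases hc : c = s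
      · subst hc
        rw [PySem.Dict.contains_insert]
        simp only [BEq.rfl, Bool.true_or, if_true, PySem.Dict.get?_insert_self, hds,
          Bool.false_eq_true, if_false]
        have h0 : (c - c).toNat = 0 := by omega
        simp [hv]
      · rw [PySem.Dict.contains_insert,
          show (c == s) = false by simpa using hc, Bool.false_or,
          PySem.Dict.get?_insert_of_ne d i hc]
        by_cases hd : d.contains c
        · simp [hd]
        · simp only [hd, Bool.false_eq_true, if_false]
          by_cases h1 : s + 1 ≤ c
          · have he : (c - s).toNat = (c - s - 1).toNat + 1 := by omega
            rw [he, show decide (s + 1 ≤ c) = true by simpa using h1,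
              show decide (s ≤ c) = true by simpa using (by omega : s ≤ c)]
            simp
            rw [show (c - (s + 1)).toNat = (c - s).toNat - 1 by omega]
          · simp [show ¬ s + 1 ≤ c from h1, show ¬ s ≤ c by omega]
    · have hs' : (v != 0 && !(d.contains s)) = false := by
        revert hs; cases h : (v != 0 && !(d.contains s)) <;> simp
      rw [show (if ((s, v).2 != 0 && !(d.contains (s, v).1)) = true
            then d.insert (s, v).1 i else d) = d by simp [hs']]
      rw [ih]
      by_cases hd : d.contains c
      · simp [hd]
      · simp only [hd, Bool.false_eq_true, if_false]
        by_cases hc : c = s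
        · subst hc
          have hv0 : v = 0 := by
            rcases Bool.and_eq_false_iff.mp hs' with h | h
            · simpa using h
            · exact absurd (by simpa using h) hd
          have h0 : (c - c).toNat = 0 := by omega
          simp [hv0, show ¬ c + 1 ≤ c by omega]
        · by_cases h1 : s + 1 ≤ c
          · have he : (c - s).toNat = (c - s - 1).toNat + 1 := by omega
            rw [he, show decide (s + 1 ≤ c) = true by simpa using h1,
              show decide (s ≤ c) = true by simpa using (by omega : s ≤ c)]
            simp
            rw [show (c - (s + 1)).toNat = (c - s).toNat - 1 by omega]
          · simp [show ¬ s + 1 ≤ c from h1, show ¬ s ≤ c by omega]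
lemma boardFold_get? (board : List (List Int)) (d : PySem.Dict Int Int) (s c : Int) :
    ((PySem.List.enumerate board s).foldl (fun d p =>
        (PySem.List.enumerate p.2 0).foldl (fun d q =>
          if q.2 != 0 && !(d.contains q.1) then d.insert q.1 p.1 else d) d) d).get? c
    = if d.contains c then d.get? c else topFind board s c := by
  induction board generalizing d s with
  | nil =>
    simp only [PySem.List.enumerate_nil, List.foldl_nil, topFind]
    split
    · rfl
    · next h =>
      exact (PySem.Dict.get?_eq_none_iff_contains d c).mpr (by revert h; cases d.contains c <;> simp)
  | cons row rest ih =>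
    rw [PySem.List.enumerate_cons, List.foldl_cons, ih]
    have hrow := rowFold_get? row d 0 s c
    have hcont : ((PySem.List.enumerate row 0).foldl (fun d q =>
        if q.2 != 0 && !(d.contains q.1) then d.insert q.1 s else d) d).contains c
        = (d.contains c || rowNZ row c) := by
      rw [PySem.Dict.contains_eq_isSome_get?, hrow]
      by_cases hd : d.contains c
      · rw [if_pos hd, hd, Bool.true_or, ← PySem.Dict.contains_eq_isSome_get?, hd]
      · have hd' : d.contains c = false := by revert hd; cases d.contains c <;> simp
        rw [if_neg hd, hd', Bool.false_or]
        unfold rowNZ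
        rw [show c - 0 = c by ring]
        cases h : decide (0 ≤ c) && (row.getD c.toNat 0 != 0) <;> simp [h]
    rw [hcont, hrow]
    by_cases hd : d.contains c
    · simp [hd, topFind]
    · have : c - 0 = c := by omega
      by_cases hr : rowNZ row c
      · have hr' : (decide (0 ≤ c) && (row.getD c.toNat 0 != 0)) = true := by
          simpa [rowNZ] using hr
        simp [hd, hr, topFind, this]
        simpa using hr'
      · have hr' : (decide (0 ≤ c) && (row.getD c.toNat 0 != 0)) = false := by
          simpa [rowNZ] using hr
        simp [hd, hr, topFind, this, hr']

lemma bTop_get? (board : List (List Int)) (c : Int) :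
    (bTop board).get? c = topFind board 0 c := by
  unfold bTop
  rw [boardFold_get?]
  simp [PySem.Dict.contains_empty]

lemma topFind_gt (board : List (List Int)) (s c y : Int) (hy : y < s + (board.length : Int)) :
    (y < (topFind board s c).getD (s + (board.length : Int))) ↔
      ∀ k : Nat, k < board.length → s + (k : Int) ≤ y → rowNZ (board.getD k []) c = false := by
  induction board generalizing s with
  | nil =>
    simp only [topFind, Option.getD_none]
    constructor
    · intro _ k hk
      simp at hk
    · intro _
      simpa using hy
  | cons row rest ih =>
    simp only [topFind]
    by_cases hr : rowNZ row c
    · simp only [hr, if_true, Option.getD_some]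
      constructor
      · intro hlt k _ hk
        exfalso; omega
      · intro h
        by_contra hsy
        have h0 := h 0 (by simp) (by omega)
        simp [hr] at h0
    · have hy' : y < (s + 1) + (rest.length : Int) := by
        simp only [List.length_cons] at hy; push_cast at hy ⊢; omega
      have := ih (s + 1) hy'
      simp only [hr, if_false, Bool.false_eq_true]
      rw [show s + ((row :: rest).length : Int) = (s + 1) + (rest.length : Int) by
        simp; push_cast; ring]
      rw [this]
      constructor
      · intro h k hk hks
        cases k with
        | zero => simpa using hr
        | succ k' =>
          have : k' < rest.length := by simpa using hk
          have := h k' this (by push_cast at hks ⊢; omega)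
          simpa using this
      · intro h k hk hks
        have := h (k + 1) (by simpa using hk) (by push_cast at hks ⊢; omega)
        simpa using this

lemma topFind_some_ge (board : List (List Int)) (s c t : Int)
    (h : topFind board s c = some t) : s ≤ t := by
  induction board generalizing s with
  | nil => simp [topFind] at h
  | cons row rest ih =>
    simp only [topFind] at h
    split at h
    · cases h; omega
    · have := ih (s + 1) h; omega

lemma bTop_getD_nonneg (board : List (List Int)) (c : Int) :
    0 ≤ (bTop board).getD c (board.length : Int) := by
  rw [PySem.Dict.getD_eq_get?_getD, bTop_get?]
  cases h : topFind board 0 c with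
  | none => simp
  | some t =>
    have := topFind_some_ge board 0 c t h
    simpa using this

-- the heart of the equivalence: "column c clear down to row y" read off the dictionary
-- equals "every scanned cell of column c is zero"
lemma col_iff (board : List (List Int)) (c y : Int) (hc : 0 ≤ c)
    (hy : y < (board.length : Int)) :
    y < (bTop board).getD c (board.length : Int) ↔
      ∀ i : Int, 0 ≤ i → i ≤ y → aCell board i c = 0 := by
  rw [PySem.Dict.getD_eq_get?_getD, bTop_get?]
  have h0 : (board.length : Int) = 0 + (board.length : Int) := by omega
  rw [show ((topFind board 0 c).getD (board.length : Int))
        = (topFind board 0 c).getD (0 + (board.length : Int)) by rw [← h0]]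
  rw [topFind_gt board 0 c y (by omega)]
  have hcell : ∀ i : Int, 0 ≤ i → aCell board i c = (board.getD i.toNat []).getD c.toNat 0 := by
    intro i h0i
    unfold aCell
    rw [show i = ((i.toNat : Nat) : Int) by omega, PySem.List.pyGetD_natCast,
      show c = ((c.toNat : Nat) : Int) by omega, PySem.List.pyGetD_natCast]
    simp
    rw [show (max i 0).toNat = i.toNat by omega, show (max c 0).toNat = c.toNat by omega]
  constructor
  · intro h i h0i hiy
    have hk := h i.toNat (by omega) (by omega)
    rw [hcell i h0i]
    simp only [rowNZ, hc, decide_true, Bool.true_and] at hk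
    simpa using hk
  · intro h k hk hky
    have := h (k : Int) (by omega) (by omega)
    rw [hcell (k : Int) (by omega)] at this
    simp only [rowNZ, hc, decide_true, Bool.true_and, Int.toNat_natCast]
    simpa using this

-- one branch of A's scan equals B's lookups, for any column list (Pre_ facts supplied as hp)
lemma branch_equiv (board : List (List Int)) (y : Int) (cols : List Int)
    (hp : 0 ≤ y → y < (board.length : Int) ∧ ∀ c ∈ cols, 0 ≤ c) :
    aLoop (fun i => cols.any (fun c => aCell board i c != 0)) (PySem.List.pyRange 0 (y + 1) 1)
    = cols.all (fun c => decide (y < (bTop board).getD c (board.length : Int))) := by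
  rw [Bool.eq_iff_iff, aLoop_range_iff, List.all_eq_true]
  constructor
  · intro h c hc
    simp only [decide_eq_true_eq]
    by_cases hy : 0 ≤ y
    · rw [col_iff board c y ((hp hy).2 c hc) (hp hy).1]
      intro i h0 hiy
      have := h i h0 hiy
      rw [List.any_eq_false] at this
      have := this c hc
      simpa using this
    · have := bTop_getD_nonneg board c
      omega
  · intro h i h0 hiy
    have hy : 0 ≤ y := by omega
    rw [List.any_eq_false]
    intro c hc
    have hcc := h c hc
    simp only [decide_eq_true_eq] at hcc
    rw [col_iff board c y ((hp hy).2 c hc) (hp hy).1] at hcc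
    simp [hcc i h0 hiy]

-- ===== VERDICT (by name: the statement is the Claim_ definition above) =====
theorem find_breakable_spec : Claim_equal_find_breakable := by
  intro ca board _ hpre
  show find_breakable ca board = find_breakable_alt ca board
  rw [find_breakable_eq_filter]
  unfold find_breakable_alt
  apply List.filter_congr
  intro a ha
  have hp := hpre a ha
  obtain ⟨t, x, y⟩ := a
  simp only [keepA]
  by_cases h1 : t = 1
  · subst h1
    have hhead := hp (x + 1) (by simp [preCols])
    have hsnd := hp (x + 2) (by simp [preCols])
    have := branch_equiv board y [x + 1, x + 2]
      (fun hy => ⟨(hhead hy).1, by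
        intro c hc; simp at hc
        rcases hc with rfl | rfl
        exacts [(hhead hy).2.1, (hsnd hy).2.1]⟩)
    simp only [List.any_cons, List.any_nil, Bool.or_false] at this
    simp only [bNeed, beq_iff_eq, if_true]
    rw [this]
    simp
  · by_cases h2 : t = 2
    · subst h2
      have hhead := hp x (by simp [preCols])
      have hsnd := hp (x + 1) (by simp [preCols])
      have := branch_equiv board y [x, x + 1]
        (fun hy => ⟨(hhead hy).1, by
          intro c hc; simp at hc
          rcases hc with rfl | rfl
          exacts [(hhead hy).2.1, (hsnd hy).2.1]⟩)
      simp only [List.any_cons, List.any_nil, Bool.or_false] at this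
      simp only [bNeed, beq_iff_eq, h1, if_false]
      rw [this]
      simp
    · by_cases h3 : t = 3
      · subst h3
        have hhead := hp (x + 1) (by simp [preCols])
        have := branch_equiv board y [x + 1]
          (fun hy => ⟨(hhead hy).1, by
            intro c hc; simp at hc; subst hc
            exact (hhead hy).2.1⟩)
        simp only [List.any_cons, List.any_nil, Bool.or_false] at this
        simp only [bNeed, beq_iff_eq, h1, h2, if_false]
        rw [this]
        simp
      · by_cases h4 : t = 4
        · subst h4
          have hhead := hp x (by simp [preCols])
          have := branch_equiv board y [x]
            (fun hy => ⟨(hhead hy).1, by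
              intro c hc; simp at hc; subst hc
              exact (hhead hy).2.1⟩)
          simp only [List.any_cons, List.any_nil, Bool.or_false] at this
          simp only [bNeed, beq_iff_eq, h1, h2, h3, if_false]
          rw [this]
          simp
        · simp [bNeed, beq_iff_eq, h1, h2, h3, h4]
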